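-- pv_equiv track=rewrite | github.com/HamBeomJoon/Algorithm | 프로그래머스/Weekly Challenge/4주차.py | solution
-- ===== SOURCE A (Python) =====
-- def solution(table, languages, preference):
--     tmp, pre = [], []
--     answer = {0: 'SI', 1: 'CONTENTS', 2: 'HARDWARE', 3: 'PORTAL', 4: 'GAME'}
--     languages_dict = {'PYTHON': 1, 'C': 2, 'C++': 3, 'C#': 4, 'JAVA': 5, 'JAVASCRIPT': 6, 'SQL': 7, 'KOTLIN': 8, 'PHP': 9}
--     SI = {1: 2, 2: 0, 3: 0, 4: 1, 5: 5, 6: 4, 7: 3, 8: 0, 9: 0}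
--     CONTENTS = {1: 3, 2: 0, 3: 1, 4: 0, 5: 4, 6: 5, 7: 2, 8: 0, 9: 0}
--     HARDWARE = {1: 3, 2: 5, 3: 4, 4: 0, 5: 2, 6: 1, 7: 0, 8: 0, 9: 0}
--     PORTAL = {1: 3, 2: 0, 3: 0, 4: 0, 5: 5, 6: 4, 7: 0, 8: 2, 9: 1}
--     GAME = {1: 0, 2: 2, 3: 5, 4: 4, 5: 1, 6: 3, 7: 0, 8: 0, 9: 0}
--
--     for i, p in zip(languages, preference):
--         tmp.append([languages_dict[i], p])
--
--     for i in (SI, CONTENTS, HARDWARE, PORTAL, GAME):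
--         pref_sum = 0
--         for l in tmp:
--             pref_sum += i[l[0]] * l[1]
--         pre.append(pref_sum)
--
--     ans = []
--     for i in range(5):
--         if pre[i] == max(pre):
--             ans.append(answer[i])
--     ans.sort()
--     return ans[0]
-- ===== SOURCE B (Python) =====
-- # Single pass over zip(languages, preference): each language contributes to all five
-- # category scores at once via a per-language 5-vector of weights; then alphabetical
-- # min among the max-score categories.
-- WEIGHTS = {
--     'PYTHON':     (2, 3, 3, 3, 0),
--     'C':          (0, 0, 5, 0, 2),
--     'C++':        (0, 1, 4, 0, 5),
--     'C#':         (1, 0, 0, 0, 4),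
--     'JAVA':       (5, 4, 2, 5, 1),
--     'JAVASCRIPT': (4, 5, 1, 4, 3),
--     'SQL':        (3, 2, 0, 0, 0),
--     'KOTLIN':     (0, 0, 0, 2, 0),
--     'PHP':        (0, 0, 0, 1, 0),
-- }
--
-- def solution(table, languages, preference):
--     s0 = s1 = s2 = s3 = s4 = 0
--     for lang, p in zip(languages, preference):
--         w0, w1, w2, w3, w4 = WEIGHTS[lang]
--         s0 += w0 * p
--         s1 += w1 * p
--         s2 += w2 * p
--         s3 += w3 * p
--         s4 += w4 * p
--     best = max(s0, s1, s2, s3, s4)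
--     candidates = [name for s, name in
--                   ((s0, 'SI'), (s1, 'CONTENTS'), (s2, 'HARDWARE'),
--                    (s3, 'PORTAL'), (s4, 'GAME')) if s == best]
--     return min(candidates)
-- ===== Notes on version B (the rewrite author's own statement) =====
-- stated objective: simpler
-- what changed: One pass over zip(languages, preference) accumulating all five category scores at once via per-language weight 5-vectors, instead of A's five separate scans of an intermediate code/pref list; the argmax tie-break (alphabetical) is kept via min over the tied names.
import Mathlib
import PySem

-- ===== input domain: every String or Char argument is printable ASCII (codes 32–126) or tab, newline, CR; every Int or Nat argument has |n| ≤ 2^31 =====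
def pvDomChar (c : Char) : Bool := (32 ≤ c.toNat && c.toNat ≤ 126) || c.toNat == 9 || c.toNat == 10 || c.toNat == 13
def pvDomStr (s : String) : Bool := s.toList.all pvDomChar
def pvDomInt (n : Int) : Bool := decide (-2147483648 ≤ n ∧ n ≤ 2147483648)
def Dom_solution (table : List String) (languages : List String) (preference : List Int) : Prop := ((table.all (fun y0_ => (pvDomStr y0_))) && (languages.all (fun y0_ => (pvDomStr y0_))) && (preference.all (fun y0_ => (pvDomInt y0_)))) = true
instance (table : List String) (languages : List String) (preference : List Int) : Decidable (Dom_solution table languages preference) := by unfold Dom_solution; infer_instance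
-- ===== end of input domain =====

-- B replaces A's five separate scans of the code/pref list by one pass over
-- zip(languages, preference) with per-language weight 5-vectors; same alphabetical tie-break.

-- ===== PORT A =====
def pvAnswerA : PySem.Dict Int String :=
  ⟨[(0, "SI"), (1, "CONTENTS"), (2, "HARDWARE"), (3, "PORTAL"), (4, "GAME")]⟩
def pvLangDictA : PySem.Dict String Int :=
  ⟨[("PYTHON", 1), ("C", 2), ("C++", 3), ("C#", 4), ("JAVA", 5),
    ("JAVASCRIPT", 6), ("SQL", 7), ("KOTLIN", 8), ("PHP", 9)]⟩
def pvSI : PySem.Dict Int Int := ⟨[(1,2),(2,0),(3,0),(4,1),(5,5),(6,4),(7,3),(8,0),(9,0)]⟩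
def pvCONTENTS : PySem.Dict Int Int := ⟨[(1,3),(2,0),(3,1),(4,0),(5,4),(6,5),(7,2),(8,0),(9,0)]⟩
def pvHARDWARE : PySem.Dict Int Int := ⟨[(1,3),(2,5),(3,4),(4,0),(5,2),(6,1),(7,0),(8,0),(9,0)]⟩
def pvPORTAL : PySem.Dict Int Int := ⟨[(1,3),(2,0),(3,0),(4,0),(5,5),(6,4),(7,0),(8,2),(9,1)]⟩
def pvGAME : PySem.Dict Int Int := ⟨[(1,0),(2,2),(3,5),(4,4),(5,1),(6,3),(7,0),(8,0),(9,0)]⟩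

-- languages_dict[i] / i[l[0]] raise KeyError on a missing key; Pre_solution excludes
-- those inputs, so the '.getD' defaults below are never reached on admitted inputs.
def solution (table : List String) (languages : List String) (preference : List Int) : String :=
  let tmp : List (Int × Int) :=
    (languages.zip preference).foldl
      (fun acc ip => acc ++ [((pvLangDictA.get? ip.1).getD 0, ip.2)]) []
  let pre : List Int :=
    [pvSI, pvCONTENTS, pvHARDWARE, pvPORTAL, pvGAME].foldl
      (fun pre i => pre ++ [tmp.foldl (fun s l => s + (i.get? l.1).getD 0 * l.2) 0]) []
  let ans : List String :=
    (PySem.List.pyRange 0 5 1).foldl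
      (fun ans i =>
        if (PySem.List.pyGet? pre i).getD 0 == (PySem.List.max? pre (fun x => x)).getD 0
        then ans ++ [(pvAnswerA.get? i).getD ""] else ans) []
  ((PySem.List.pyGet? (PySem.List.sorted ans (fun x => x) false) 0).getD "")

-- ===== PORT B =====
def pvWeightsB : PySem.Dict String (Int × Int × Int × Int × Int) :=
  ⟨[("PYTHON", (2,3,3,3,0)), ("C", (0,0,5,0,2)), ("C++", (0,1,4,0,5)),
    ("C#", (1,0,0,0,4)), ("JAVA", (5,4,2,5,1)), ("JAVASCRIPT", (4,5,1,4,3)),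
    ("SQL", (3,2,0,0,0)), ("KOTLIN", (0,0,0,2,0)), ("PHP", (0,0,0,1,0))]⟩

def solution_alt (table : List String) (languages : List String) (preference : List Int) : String :=
  let s : Int × Int × Int × Int × Int :=
    (languages.zip preference).foldl
      (fun st lp =>
        let w := (pvWeightsB.get? lp.1).getD (0,0,0,0,0)
        (st.1 + w.1 * lp.2, st.2.1 + w.2.1 * lp.2, st.2.2.1 + w.2.2.1 * lp.2,
         st.2.2.2.1 + w.2.2.2.1 * lp.2, st.2.2.2.2 + w.2.2.2.2 * lp.2))
      (0, 0, 0, 0, 0)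
  let best : Int := max (max (max (max s.1 s.2.1) s.2.2.1) s.2.2.2.1) s.2.2.2.2
  let candidates : List String :=
    (([(s.1, "SI"), (s.2.1, "CONTENTS"), (s.2.2.1, "HARDWARE"),
       (s.2.2.2.1, "PORTAL"), (s.2.2.2.2, "GAME")].filter (fun p => p.1 == best)).map (·.2))
  (PySem.List.min? candidates (fun x => x)).getD ""

-- ===== PRECONDITION & SPEC =====
-- A raises KeyError when a zipped language is not one of the nine known names;
-- Pre_solution admits exactly the inputs where every zipped language is known.
def Pre_solution (table : List String) (languages : List String) (preference : List Int) : Prop :=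
  ∀ l ∈ languages.take preference.length,
    l ∈ ["PYTHON", "C", "C++", "C#", "JAVA", "JAVASCRIPT", "SQL", "KOTLIN", "PHP"]
instance (table : List String) (languages : List String) (preference : List Int) : Decidable (Pre_solution table languages preference) := by unfold Pre_solution; infer_instance
def pvWitness_solution : List String × List String × List Int :=
  ([], ["PYTHON", "JAVA", "SQL"], [3, 1, 4])

def Spec_solution (table : List String) (languages : List String) (preference : List Int) (out : String) : Prop := out = solution_alt table languages preference
instance (table : List String) (languages : List String) (preference : List Int) (out : String) : Decidable (Spec_solution table languages preference out) := by unfold Spec_solution; infer_instance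

-- ===== CLAIM (what is proved, stated in full; the proofs are below) =====
def Claim_equal_solution : Prop := ∀ (table : List String) (languages : List String) (preference : List Int), Dom_solution table languages preference → Pre_solution table languages preference → Spec_solution table languages preference (solution table languages preference)

-- ===== LEMMAS AND PROOFS =====

-- For every string l, A's category-dict lookup through the language code agrees with
-- the components of B's weight vector (both give 0 on an unknown language name).
theorem pvW (l : String) :
    (pvSI.get? ((pvLangDictA.get? l).getD 0)).getD 0 = ((pvWeightsB.get? l).getD (0,0,0,0,0)).1
  ∧ (pvCONTENTS.get? ((pvLangDictA.get? l).getD 0)).getD 0 = ((pvWeightsB.get? l).getD (0,0,0,0,0)).2.1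
  ∧ (pvHARDWARE.get? ((pvLangDictA.get? l).getD 0)).getD 0 = ((pvWeightsB.get? l).getD (0,0,0,0,0)).2.2.1
  ∧ (pvPORTAL.get? ((pvLangDictA.get? l).getD 0)).getD 0 = ((pvWeightsB.get? l).getD (0,0,0,0,0)).2.2.2.1
  ∧ (pvGAME.get? ((pvLangDictA.get? l).getD 0)).getD 0 = ((pvWeightsB.get? l).getD (0,0,0,0,0)).2.2.2.2 := by
  by_cases h1 : l = "PYTHON"; · subst h1; decide
  by_cases h2 : l = "C"; · subst h2; decide
  by_cases h3 : l = "C++"; · subst h3; decide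
  by_cases h4 : l = "C#"; · subst h4; decide
  by_cases h5 : l = "JAVA"; · subst h5; decide
  by_cases h6 : l = "JAVASCRIPT"; · subst h6; decide
  by_cases h7 : l = "SQL"; · subst h7; decide
  by_cases h8 : l = "KOTLIN"; · subst h8; decide
  by_cases h9 : l = "PHP"; · subst h9; decide
  have hA : pvLangDictA.get? l = none := by
    simp only [pvLangDictA, PySem.Dict.get?_mk_cons]
    simp [Ne.symm h1, Ne.symm h2, Ne.symm h3, Ne.symm h4, Ne.symm h5,
          Ne.symm h6, Ne.symm h7, Ne.symm h8, Ne.symm h9]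
    exact PySem.Dict.get?_empty l
  have hB : pvWeightsB.get? l = none := by
    simp only [pvWeightsB, PySem.Dict.get?_mk_cons]
    simp [Ne.symm h1, Ne.symm h2, Ne.symm h3, Ne.symm h4, Ne.symm h5,
          Ne.symm h6, Ne.symm h7, Ne.symm h8, Ne.symm h9]
    exact PySem.Dict.get?_empty l
  rw [hA, hB]; decide

-- B's single-pass fold computes, in each component, the weighted sum of one category.
theorem foldB (zs : List (String × Int)) (st : Int × Int × Int × Int × Int) :
    zs.foldl
      (fun st lp =>
        let w := (pvWeightsB.get? lp.1).getD (0,0,0,0,0)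
        (st.1 + w.1 * lp.2, st.2.1 + w.2.1 * lp.2, st.2.2.1 + w.2.2.1 * lp.2,
         st.2.2.2.1 + w.2.2.2.1 * lp.2, st.2.2.2.2 + w.2.2.2.2 * lp.2)) st
    = (st.1 + (zs.map (fun lp => ((pvWeightsB.get? lp.1).getD (0,0,0,0,0)).1 * lp.2)).sum,
       st.2.1 + (zs.map (fun lp => ((pvWeightsB.get? lp.1).getD (0,0,0,0,0)).2.1 * lp.2)).sum,
       st.2.2.1 + (zs.map (fun lp => ((pvWeightsB.get? lp.1).getD (0,0,0,0,0)).2.2.1 * lp.2)).sum,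
       st.2.2.2.1 + (zs.map (fun lp => ((pvWeightsB.get? lp.1).getD (0,0,0,0,0)).2.2.2.1 * lp.2)).sum,
       st.2.2.2.2 + (zs.map (fun lp => ((pvWeightsB.get? lp.1).getD (0,0,0,0,0)).2.2.2.2 * lp.2)).sum) := by
  induction zs generalizing st with
  | nil => simp
  | cons hd tl ih =>
    simp only [List.foldl_cons, List.map_cons, List.sum_cons, ih]
    simp [Prod.ext_iff]
    refine ⟨by ring, by ring, by ring, by ring, by ring⟩

theorem head_sorted_eq_min (l : List String) :
    (PySem.List.pyGet? (PySem.List.sorted l (fun x => x) false) 0).getD ""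
      = (PySem.List.min? l (fun x => x)).getD "" := by
  cases hl : PySem.List.sorted l (fun x => x) false with
  | nil =>
    have : l = [] := (PySem.List.sorted_eq_nil_iff _ _ _).mp hl
    subst this; rfl
  | cons m t =>
    have hml : m ∈ l := by
      have : m ∈ PySem.List.sorted l (fun x => x) false := by rw [hl]; exact List.mem_cons_self
      exact (PySem.List.mem_sorted _ _ _ _).mp this
    have hne : l ≠ [] := by rintro rfl; simp [PySem.List.sorted] at hl
    obtain ⟨n, hn⟩ : ∃ n, PySem.List.min? l (fun x => x) = some n := by
      cases h : PySem.List.min? l (fun x => x) with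
      | none => exact absurd ((PySem.List.min?_eq_none_iff _ _).mp h) hne
      | some n => exact ⟨n, rfl⟩
    have hnl : n ∈ l := PySem.List.min?_mem hn
    have h1 : m ≤ n := PySem.List.key_head_sorted_le l (fun x => x) hl n hnl
    have h2 : n ≤ m := PySem.List.min?_isMin hn m hml
    rw [hn, PySem.List.pyGet?_zero_cons]
    simpa using le_antisymm h1 h2

-- A's selection (argmax by index order, then alphabetical sort, then head) equals
-- B's selection (alphabetical min over the tied names), for arbitrary scores.
theorem select_eq (a b c d e : Int) :
    (PySem.List.pyGet? (PySem.List.sorted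
      ((PySem.List.pyRange 0 5 1).foldl (fun ans i =>
        if (PySem.List.pyGet? [a,b,c,d,e] i).getD 0 == (PySem.List.max? [a,b,c,d,e] (fun x => x)).getD 0
        then ans ++ [(pvAnswerA.get? i).getD ""] else ans) [])
      (fun x => x) false) 0).getD ""
    = (PySem.List.min? (([(a,"SI"),(b,"CONTENTS"),(c,"HARDWARE"),(d,"PORTAL"),(e,"GAME")].filter
        (fun p => p.1 == max (max (max (max a b) c) d) e)).map (·.2)) (fun x => x)).getD "" := by
  have hr : PySem.List.pyRange 0 5 1 = [0,1,2,3,4] := by decide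
  have hm : PySem.List.max? [a,b,c,d,e] (fun x => x) = some (max (max (max (max a b) c) d) e) := by
    rw [PySem.List.max?_id_cons]; simp [List.foldl]
  have g0 : PySem.List.pyGet? [a,b,c,d,e] 0 = some a := rfl
  have g1 : PySem.List.pyGet? [a,b,c,d,e] 1 = some b := rfl
  have g2 : PySem.List.pyGet? [a,b,c,d,e] 2 = some c := rfl
  have g3 : PySem.List.pyGet? [a,b,c,d,e] 3 = some d := rfl
  have g4 : PySem.List.pyGet? [a,b,c,d,e] 4 = some e := rfl
  have a0 : (pvAnswerA.get? 0).getD "" = "SI" := rfl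
  have a1 : (pvAnswerA.get? 1).getD "" = "CONTENTS" := rfl
  have a2 : (pvAnswerA.get? 2).getD "" = "HARDWARE" := rfl
  have a3 : (pvAnswerA.get? 3).getD "" = "PORTAL" := rfl
  have a4 : (pvAnswerA.get? 4).getD "" = "GAME" := rfl
  rw [hr, hm, head_sorted_eq_min]
  simp only [List.foldl, g0, g1, g2, g3, g4, Option.getD_some]
  generalize max (max (max (max a b) c) d) e = M
  by_cases h0 : a = M <;> by_cases h1 : b = M <;> by_cases h2 : c = M <;>
  by_cases h3 : d = M <;> by_cases h4 : e = M <;>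
    simp [h0, h1, h2, h3, h4, a0, a1, a2, a3, a4]

-- ===== VERDICT (by name: the statement is the Claim_ definition above) =====
theorem solution_spec : Claim_equal_solution := by
  intro t ls ps _ _
  unfold Spec_solution solution solution_alt
  rw [PySem.List.foldl_append_singleton_eq_map
        (fun ip => ((pvLangDictA.get? ip.1).getD 0, ip.2)) (ls.zip ps) []]
  rw [foldB]
  generalize (ls.zip ps) = zs
  simp only [List.nil_append, List.foldl, zero_add]
  have hsum : ∀ d : PySem.Dict Int Int,
      (zs.map (fun ip => ((pvLangDictA.get? ip.1).getD 0, ip.2))).foldl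
        (fun s l => s + (d.get? l.1).getD 0 * l.2) 0
      = (zs.map (fun lp => (d.get? ((pvLangDictA.get? lp.1).getD 0)).getD 0 * lp.2)).sum := by
    intro d
    rw [List.foldl_map, PySem.List.foldl_add]
    simp
  simp only [hsum]
  have rw1 : (fun lp : String × Int => (pvSI.get? ((pvLangDictA.get? lp.1).getD 0)).getD 0 * lp.2)
      = (fun lp : String × Int => ((pvWeightsB.get? lp.1).getD (0,0,0,0,0)).1 * lp.2) :=
    funext fun lp => by rw [(pvW lp.1).1]
  have rw2 : (fun lp : String × Int => (pvCONTENTS.get? ((pvLangDictA.get? lp.1).getD 0)).getD 0 * lp.2)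
      = (fun lp : String × Int => ((pvWeightsB.get? lp.1).getD (0,0,0,0,0)).2.1 * lp.2) :=
    funext fun lp => by rw [(pvW lp.1).2.1]
  have rw3 : (fun lp : String × Int => (pvHARDWARE.get? ((pvLangDictA.get? lp.1).getD 0)).getD 0 * lp.2)
      = (fun lp : String × Int => ((pvWeightsB.get? lp.1).getD (0,0,0,0,0)).2.2.1 * lp.2) :=
    funext fun lp => by rw [(pvW lp.1).2.2.1]
  have rw4 : (fun lp : String × Int => (pvPORTAL.get? ((pvLangDictA.get? lp.1).getD 0)).getD 0 * lp.2)
      = (fun lp : String × Int => ((pvWeightsB.get? lp.1).getD (0,0,0,0,0)).2.2.2.1 * lp.2) :=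
    funext fun lp => by rw [(pvW lp.1).2.2.2.1]
  have rw5 : (fun lp : String × Int => (pvGAME.get? ((pvLangDictA.get? lp.1).getD 0)).getD 0 * lp.2)
      = (fun lp : String × Int => ((pvWeightsB.get? lp.1).getD (0,0,0,0,0)).2.2.2.2 * lp.2) :=
    funext fun lp => by rw [(pvW lp.1).2.2.2.2]
  rw [rw1, rw2, rw3, rw4, rw5]
  exact select_eq _ _ _ _ _
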